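-- pv_equiv track=rewrite | github.com/heeya15/Algorithm_Study | 2022_10_Study/221031/박동준_programmers_스킬트리.py | solution
-- ===== SOURCE A (Python) =====
-- def solution(skill, skill_trees):
--     answer = -1
--     arr =  []
--     for i in skill_trees:
--         word = ""
--         for j in i:
--             if j in skill:
--                 word += j
--         arr.append(word)
--     count = 0
--     for k in arr:
--         if k in skill and skill[:len(k)] == k:
--             count += 1
--
--     return count
-- ===== SOURCE B (Python) =====
-- def solution(skill, skill_trees):
--     skill_set = set(skill)
--     count = 0
--     for tree in skill_trees:
--         p = 0
--         ok = True
--         for c in tree: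
--             if c in skill_set:
--                 if p < len(skill) and skill[p] == c:
--                     p += 1
--                 else:
--                     ok = False
--                     break
--         if ok:
--             count += 1
--     return count
-- ===== Notes on version B (the rewrite author's own statement) =====
-- stated objective: faster
-- what changed: Instead of building a filtered word per tree and testing it with a substring scan over skill plus a slice comparison, B walks each tree once with an integer pointer into skill (set membership for skill letters), failing on the first skill-letter that is not the next expected one; no intermediate strings and no substring search.
import Mathlib
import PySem

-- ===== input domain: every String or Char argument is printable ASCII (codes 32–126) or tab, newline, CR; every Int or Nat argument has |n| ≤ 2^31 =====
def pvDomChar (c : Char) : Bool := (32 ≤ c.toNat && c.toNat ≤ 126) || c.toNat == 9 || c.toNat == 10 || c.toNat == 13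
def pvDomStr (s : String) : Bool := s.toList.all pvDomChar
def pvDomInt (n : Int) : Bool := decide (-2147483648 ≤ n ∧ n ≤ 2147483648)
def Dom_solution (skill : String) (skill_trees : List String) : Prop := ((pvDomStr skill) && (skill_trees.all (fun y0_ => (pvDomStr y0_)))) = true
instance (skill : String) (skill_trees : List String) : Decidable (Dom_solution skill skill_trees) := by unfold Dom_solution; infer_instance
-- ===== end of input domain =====

-- B replaces A's build-a-filtered-word-per-tree + substring/slice prefix test by a single
-- pointer walk over each tree (objective: faster — one pass, no intermediate strings; measured faster in a timing run).

-- ===== PORT A =====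
def solution (skill : String) (skill_trees : List String) : Int :=
  -- arr: for each tree, the word of its characters that occur in skill
  let arr : List (List Char) :=
    skill_trees.foldl (fun arr i =>
      let word : List Char :=
        i.toList.foldl (fun word j =>
          if PySem.Chars.isIn [j] skill.toList then word ++ [j] else word) []
      arr ++ [word]) []
  -- count: k in skill and skill[:len(k)] == k
  arr.foldl (fun count k =>
    if PySem.Chars.isIn k skill.toList
        && (PySem.Chars.slice skill.toList none (some (k.length : Int)) == k)
    then count + 1 else count) 0

-- ===== PORT B =====
-- pointer walk: ok while each skill-letter met equals skill[p]; break (false) on mismatch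
def pvWalk (sk : List Char) (ss : PySem.Set Char) : List Char → Nat → Bool
  | [], _ => true
  | c :: rest, p =>
    if PySem.Set.contains ss c then
      if sk[p]? = some c then pvWalk sk ss rest (p + 1) else false
    else pvWalk sk ss rest p

def solution_alt (skill : String) (skill_trees : List String) : Int :=
  let skill_set : PySem.Set Char := PySem.Set.ofList skill.toList
  skill_trees.foldl (fun count tree =>
    if pvWalk skill.toList skill_set tree.toList 0 then count + 1 else count) 0

-- ===== PRECONDITION & SPEC =====
def Spec_solution (skill : String) (skill_trees : List String) (out : Int) : Prop := out = solution_alt skill skill_trees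
instance (skill : String) (skill_trees : List String) (out : Int) : Decidable (Spec_solution skill skill_trees out) := by unfold Spec_solution; infer_instance

-- ===== CLAIM (what is proved, stated in full; the proofs are below) =====
def Claim_equal_solution : Prop := ∀ (skill : String) (skill_trees : List String), Dom_solution skill skill_trees → Spec_solution skill skill_trees (solution skill skill_trees)

-- ===== LEMMAS AND PROOFS =====

-- a one-character string is a substring iff the character is a member
theorem pv_singleton_isIn (j : Char) (sk : List Char) :
    PySem.Chars.isIn [j] sk = decide (j ∈ sk) := by
  rcases h : decide (j ∈ sk) with _ | _
  · simp only [decide_eq_false_iff_not] at h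
    rw [PySem.Chars.isIn_eq_false_iff]
    intro hinf
    exact h (hinf.sublist.subset (by simp))
  · simp only [decide_eq_true_eq] at h
    rw [PySem.Chars.isIn_iff_infix]
    obtain ⟨u, v, rfl⟩ := List.append_of_mem h
    exact ⟨u, v, by simp⟩

-- A's per-word test is exactly "k is a prefix of skill"
theorem pv_predA (sk k : List Char) :
    (PySem.Chars.isIn k sk
      && (PySem.Chars.slice sk none (some (k.length : Int)) == k))
    = decide (k <+: sk) := by
  rw [PySem.Chars.slice_eq_listSlice, PySem.List.slice_to_natCast]
  rcases hp : decide (k <+: sk) with _ | _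
  · simp only [decide_eq_false_iff_not] at hp
    have : ¬ (sk.take k.length == k) = true := by
      simp only [beq_iff_eq]
      intro h
      exact hp (h ▸ List.take_prefix _ _)
    simp
    intro h; exact fun hk => this (by simp [hk])
  · simp only [decide_eq_true_eq] at hp
    have h1 : PySem.Chars.isIn k sk = true := by
      rw [PySem.Chars.isIn_iff_infix]; exact hp.isInfix
    have h2 : sk.take k.length = k := (List.prefix_iff_eq_take.mp hp).symm
    simp [h1, h2]

-- the pointer walk decides "filtered word is a prefix of the rest of skill"
theorem pv_walk_spec (sk : List Char) (l : List Char) (p : Nat) :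
    pvWalk sk (PySem.Set.ofList sk) l p
      = decide ((l.filter (fun j => decide (j ∈ sk))) <+: sk.drop p) := by
  induction l generalizing p with
  | nil => simp [pvWalk]
  | cons c rest ih =>
    have hmem : PySem.Set.contains (PySem.Set.ofList sk) c = decide (c ∈ sk) := by
      rcases h : decide (c ∈ sk) with _ | _
      · simp only [decide_eq_false_iff_not] at h
        simpa [PySem.Set.contains_iff, PySem.Set.mem_ofList] using h
      · simp only [decide_eq_true_eq] at h
        simp [PySem.Set.mem_ofList, h]
    rcases h : decide (c ∈ sk) with _ | _
    · simp only [decide_eq_false_iff_not] at h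
      simp [pvWalk, h, ih]
    · simp only [decide_eq_true_eq] at h
      rcases hg : sk[p]? with _ | d
      · have hlen : sk.length ≤ p := by simpa using List.getElem?_eq_none_iff.mp hg
        have hdrop : sk.drop p = [] := List.drop_eq_nil_of_le hlen
        simp [pvWalk, h, hg, hdrop]
      · obtain ⟨hplt, hgel⟩ := List.getElem?_eq_some_iff.mp hg
        have hdrop : sk.drop p = d :: sk.drop (p + 1) := by
          rw [List.drop_eq_getElem_cons hplt, hgel]
        by_cases hdc : d = c
        · subst hdc
          simp [pvWalk, h, hg, ih, hdrop]
        · have hne : ¬ (sk[p]? = some c) := by simp [hg, hdc]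
          simp [pvWalk, h, hne, hdrop, List.cons_prefix_cons, Ne.symm hdc]

-- ===== VERDICT (by name: the statement is the Claim_ definition above) =====
theorem solution_spec : Claim_equal_solution := by
  intro skill skill_trees _
  unfold Spec_solution solution solution_alt
  rw [PySem.List.foldl_append_singleton_eq_map]
  simp only [List.nil_append]
  rw [PySem.List.foldl_if_add_one, PySem.List.foldl_if_add_one]
  congr 1
  congr 1
  rw [List.countP_map]
  refine List.countP_congr fun t _ => ?_
  have hb : ((fun k => PySem.Chars.isIn k skill.toList
        && (PySem.Chars.slice skill.toList none (some (k.length : Int)) == k)) ∘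
      fun i => List.foldl (fun word j =>
        if PySem.Chars.isIn [j] skill.toList = true then word ++ [j] else word) [] i.toList) t
      = pvWalk skill.toList (PySem.Set.ofList skill.toList) t.toList 0 := by
    simp only [Function.comp_apply]
    rw [PySem.List.foldl_append_if_eq_filter, pv_walk_spec, pv_predA]
    simp only [List.nil_append, List.drop_zero]
    have hf := List.filter_congr (l := t.toList) fun j _ => pv_singleton_isIn j skill.toList
    rw [hf]
    rfl
  rw [hb]
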